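-- pv_equiv track=rewrite | github.com/qkmk/mimicIII | code/parse_dataset.py | _find_conversation_value
-- ===== SOURCE A (Python) =====
-- def _find_conversation_value(conversations, role: str) -> str:
--     role_lower = role.lower()
--     for turn in conversations or []:
--         if str(turn.get("from", "")).lower() == role_lower:
--             return str(turn.get("value", "") or "")
--     for turn in conversations or []:
--         if str(turn.get("role", "")).lower() == role_lower:
--             return str(turn.get("value", "") or "")
--     return ""
-- ===== SOURCE B (Python) =====
-- def _find_conversation_value(conversations, role: str) -> str:
--     role_lower = role.lower()
--     fallback = None
--     for turn in conversations or []: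
--         if str(turn.get("from", "")).lower() == role_lower:
--             return str(turn.get("value", "") or "")
--         if fallback is None and str(turn.get("role", "")).lower() == role_lower:
--             fallback = str(turn.get("value", "") or "")
--     return fallback if fallback is not None else ""
-- ===== Notes on version B (the rewrite author's own statement) =====
-- stated objective: simpler
-- what changed: Replaces A's two full passes over the conversation list by a single pass that returns immediately on a from-match and records the first role-match as a fallback.
import Mathlib
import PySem

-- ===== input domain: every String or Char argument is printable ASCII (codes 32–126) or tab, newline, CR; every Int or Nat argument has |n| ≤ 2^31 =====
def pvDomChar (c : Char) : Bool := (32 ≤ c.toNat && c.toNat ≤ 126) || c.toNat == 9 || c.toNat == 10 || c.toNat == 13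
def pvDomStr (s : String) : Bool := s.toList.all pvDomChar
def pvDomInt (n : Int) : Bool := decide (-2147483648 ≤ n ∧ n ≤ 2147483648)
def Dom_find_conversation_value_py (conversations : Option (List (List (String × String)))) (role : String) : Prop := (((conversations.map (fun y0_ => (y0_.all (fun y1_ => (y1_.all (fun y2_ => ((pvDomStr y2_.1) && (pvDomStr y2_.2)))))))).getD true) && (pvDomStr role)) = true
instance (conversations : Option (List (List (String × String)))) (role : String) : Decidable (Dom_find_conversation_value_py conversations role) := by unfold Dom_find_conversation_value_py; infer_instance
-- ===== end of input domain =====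

-- B replaces A's two full passes by a single pass with an early return on a
-- from-match and a once-set fallback for the first role-match (objective: simpler).

-- ===== PORT A =====
-- turn.get(k, "") on a dict: first match in the association list, "" if absent.
-- (str(...) and `or ""` are identity on the String values of this domain.)
def pvGetS (t : List (String × String)) (k : String) : String :=
  match t.find? (fun p => p.1 == k) with
  | some p => p.2
  | none => ""

-- first for-loop of A: first turn whose "from" matches role_lower
def pvLoopFromA (rl : String) : List (List (String × String)) → Option String
  | [] => none
  | t :: ts =>
    if PySem.Str.lower (pvGetS t "from") == rl then some (pvGetS t "value")
    else pvLoopFromA rl ts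

-- second for-loop of A: first turn whose "role" matches role_lower
def pvLoopRoleA (rl : String) : List (List (String × String)) → Option String
  | [] => none
  | t :: ts =>
    if PySem.Str.lower (pvGetS t "role") == rl then some (pvGetS t "value")
    else pvLoopRoleA rl ts

def find_conversation_value_py (conversations : Option (List (List (String × String)))) (role : String) : String :=
  let rl := PySem.Str.lower role
  let cs := conversations.getD []
  match pvLoopFromA rl cs with
  | some v => v
  | none =>
    match pvLoopRoleA rl cs with
    | some v => v
    | none => ""

-- ===== PORT B =====
-- single pass: early return on a from-match, record the first role-match in fb
def pvLoopB (rl : String) (fb : Option String) : List (List (String × String)) → String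
  | [] => fb.getD ""
  | t :: ts =>
    if PySem.Str.lower (pvGetS t "from") == rl then pvGetS t "value"
    else if fb.isNone && (PySem.Str.lower (pvGetS t "role") == rl) then
      pvLoopB rl (some (pvGetS t "value")) ts
    else pvLoopB rl fb ts

def find_conversation_value_py_alt (conversations : Option (List (List (String × String)))) (role : String) : String :=
  let rl := PySem.Str.lower role
  pvLoopB rl none (conversations.getD [])

-- ===== PRECONDITION & SPEC =====
def Spec_find_conversation_value_py (conversations : Option (List (List (String × String)))) (role : String) (out : String) : Prop := out = find_conversation_value_py_alt conversations role
instance (conversations : Option (List (List (String × String)))) (role : String) (out : String) : Decidable (Spec_find_conversation_value_py conversations role out) := by unfold Spec_find_conversation_value_py; infer_instance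

-- ===== CLAIM (what is proved, stated in full; the proofs are below) =====
def Claim_equal_find_conversation_value_py : Prop := ∀ (conversations : Option (List (List (String × String)))) (role : String), Dom_find_conversation_value_py conversations role → Spec_find_conversation_value_py conversations role (find_conversation_value_py conversations role)

-- ===== LEMMAS AND PROOFS =====

-- invariant of B's single pass: a from-match ahead wins, otherwise the stored
-- fallback, otherwise the first role-match ahead, otherwise ""
theorem pvLoopB_eq (rl : String) (ts : List (List (String × String))) :
    ∀ fb : Option String,
      pvLoopB rl fb ts = (pvLoopFromA rl ts).getD (fb.getD ((pvLoopRoleA rl ts).getD "")) := by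
  induction ts with
  | nil => intro fb; cases fb <;> simp [pvLoopB, pvLoopFromA, pvLoopRoleA]
  | cons t ts ih =>
    intro fb
    by_cases hf : PySem.Str.lower (pvGetS t "from") == rl
    · simp [pvLoopB, pvLoopFromA, hf]
    · by_cases hr : PySem.Str.lower (pvGetS t "role") == rl
      · cases fb <;> simp [pvLoopB, pvLoopFromA, pvLoopRoleA, hf, hr, ih]
      · cases fb <;> simp [pvLoopB, pvLoopFromA, pvLoopRoleA, hf, hr, ih]

-- ===== VERDICT (by name: the statement is the Claim_ definition above) =====
theorem find_conversation_value_py_spec : Claim_equal_find_conversation_value_py := by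
  intro conversations role _
  unfold Spec_find_conversation_value_py find_conversation_value_py find_conversation_value_py_alt
  rw [pvLoopB_eq]
  rcases hf : pvLoopFromA (PySem.Str.lower role) (conversations.getD []) with _ | v
  · rcases hr : pvLoopRoleA (PySem.Str.lower role) (conversations.getD []) with _ | w <;>
      simp [hf, hr]
  · simp [hf]
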